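-- pv_equiv track=rewrite | github.com/Retopia/Futoshiki-Solver | main.py | degree_heuristic
-- ===== SOURCE A (Python) =====
-- def degree_heuristic(board, cells):
--     # Create a dictionary that maps each cell to the number of unassigned neighbors
--     degree = {}
--     for x, y in cells:
--         # Count the number of unassigned neighbors
--         count = 0
--         for i in range(len(board)):
--             if board[i][y] == "0":
--                 count += 1
--         for j in range(len(board[y])):
--             if board[x][j] == "0":
--                 count += 1
--         # Subtract 1 from the count because the cell itself is included in the count
--         degree[(x, y)] = count - 1
--
--     # Pick the cell with the most unassigned neighbors
--     max_degree = 0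
--     chosen_cell = None
--     for cell, count in degree.items():
--         if count > max_degree:
--             max_degree = count
--             chosen_cell = cell
--
--     # Return the chosen cell
--     return chosen_cell
-- ===== SOURCE B (Python) =====
-- def degree_heuristic(board, cells):
--     # Precompute zero counts once per row and per column, then score each cell in O(1).
--     row_zeros = [row.count("0") for row in board]
--     col_zeros = [col.count("0") for col in zip(*board)]
--     best_count = 0
--     best_cell = None
--     for cell in cells:
--         x, y = cell
--         count = row_zeros[x] + col_zeros[y] - 1
--         if count > best_count:
--             best_count = count
--             best_cell = cell
--     return best_cell
-- ===== Notes on version B (the rewrite author's own statement) =====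
-- stated objective: faster
-- what changed: Instead of rescanning a whole row and column of the board for every cell, B precomputes per-row and per-column zero counts once and scores each cell with two O(1) lookups; it also drops the intermediate dict and picks the best cell in the same single pass over cells.
-- outside the precondition, e.g. on degree_heuristic([['0', '1', '0'], ['1', '1']], [(0, 1)]): A returns None, B returns (0, 1)
import Mathlib
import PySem

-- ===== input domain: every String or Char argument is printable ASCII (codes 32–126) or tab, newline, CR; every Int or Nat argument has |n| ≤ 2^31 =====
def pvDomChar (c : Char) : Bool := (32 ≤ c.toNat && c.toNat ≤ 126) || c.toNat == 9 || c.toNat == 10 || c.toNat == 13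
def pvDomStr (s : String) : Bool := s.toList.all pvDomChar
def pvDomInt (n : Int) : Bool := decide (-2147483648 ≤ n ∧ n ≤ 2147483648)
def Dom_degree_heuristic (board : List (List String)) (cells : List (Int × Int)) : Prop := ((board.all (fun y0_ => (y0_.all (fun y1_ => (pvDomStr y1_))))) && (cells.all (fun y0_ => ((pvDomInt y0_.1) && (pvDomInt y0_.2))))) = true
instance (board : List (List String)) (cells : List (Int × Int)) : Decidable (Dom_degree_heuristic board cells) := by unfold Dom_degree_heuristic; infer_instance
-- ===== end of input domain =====

-- B precomputes per-row and per-column zero counts once, then scores each cell in O(1);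
-- A rescans a row and a column of the board for every cell.

-- ===== PORT A =====
-- per-cell count of A's two inner loops: column scan, then row scan (bounded by len(board[y]))
def pvCountA (board : List (List String)) (x y : Int) : Int :=
  let count : Int := (PySem.List.pyRange 0 (board.length : Int) 1).foldl
    (fun cnt i => if PySem.List.pyGetD (PySem.List.pyGetD board i []) y "" = "0" then cnt + 1 else cnt) 0
  (PySem.List.pyRange 0 (((PySem.List.pyGetD board y []).length : Nat) : Int) 1).foldl
    (fun cnt j => if PySem.List.pyGetD (PySem.List.pyGetD board x []) j "" = "0" then cnt + 1 else cnt) count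

def degree_heuristic (board : List (List String)) (cells : List (Int × Int)) : Option (Int × Int) :=
  let degree : PySem.Dict (Int × Int) Int :=
    cells.foldl (fun d c => d.insert c (pvCountA board c.1 c.2 - 1)) PySem.Dict.empty
  (degree.items.foldl
      (fun s p => if p.2 > s.1 then (p.2, some p.1) else s)
      ((0 : Int), (none : Option (Int × Int)))).2

-- ===== PORT B =====
-- row_zeros = [row.count("0") for row in board]
def pvRowZeros (board : List (List String)) : List Int :=
  board.map (fun row => (PySem.List.count row "0" : Int))

-- hand-port of Python's zip(*rows), exact: the transposed tuples, truncated at the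
-- shortest row; [] when rows = [] (PySem has no n-ary zip)
def pvZipStar (rows : List (List String)) : List (List String) :=
  (List.range (((rows.map List.length).min?).getD 0)).map
    (fun i => rows.map (fun row => row.getD i ""))

-- col_zeros = [col.count("0") for col in zip(*board)]
def pvColZeros (board : List (List String)) : List Int :=
  (pvZipStar board).map (fun col => (PySem.List.count col "0" : Int))

def degree_heuristic_alt (board : List (List String)) (cells : List (Int × Int)) : Option (Int × Int) :=
  let rowZeros := pvRowZeros board
  let colZeros := pvColZeros board
  (cells.foldl
      (fun s c =>
        let count := PySem.List.pyGetD rowZeros c.1 0 + PySem.List.pyGetD colZeros c.2 0 - 1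
        if count > s.1 then (count, some c) else s)
      ((0 : Int), (none : Option (Int × Int)))).2

-- ===== PRECONDITION & SPEC =====
-- Pre_ restricts to the natural domain of the solver: every cell index in range (Python's
-- negative in-range indices included) and, when any cell is to be scored, a SQUARE board.
-- Outside it A raises (an out-of-range cell index is an IndexError), or the board is ragged —
-- a shape a Futoshiki solver never passes, on which A's row scan is bounded by the length of
-- row y instead of row x (and B would count the full row, or raise).
def Pre_degree_heuristic (board : List (List String)) (cells : List (Int × Int)) : Prop :=
  (cells = [] ∨ ∀ row ∈ board, row.length = board.length) ∧
  (∀ c ∈ cells, PySem.Raise.InRange board.length c.1 ∧ PySem.Raise.InRange board.length c.2)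
instance (board : List (List String)) (cells : List (Int × Int)) : Decidable (Pre_degree_heuristic board cells) := by
  unfold Pre_degree_heuristic PySem.Raise.InRange; infer_instance

def pvWitness_degree_heuristic : List (List String) × (List (Int × Int)) :=
  ([["0", "1"], ["1", "0"]], [(0, 0), (1, -1)])

def Spec_degree_heuristic (board : List (List String)) (cells : List (Int × Int)) (out : Option (Int × Int)) : Prop := out = degree_heuristic_alt board cells
instance (board : List (List String)) (cells : List (Int × Int)) (out : Option (Int × Int)) : Decidable (Spec_degree_heuristic board cells out) := by unfold Spec_degree_heuristic; infer_instance

-- ===== CLAIM (what is proved, stated in full; the proofs are below) =====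
def Claim_equal_degree_heuristic : Prop := ∀ (board : List (List String)) (cells : List (Int × Int)), Dom_degree_heuristic board cells → Pre_degree_heuristic board cells → Spec_degree_heuristic board cells (degree_heuristic board cells)

-- ===== LEMMAS AND PROOFS =====

-- B's per-cell score
def pvG (board : List (List String)) (c : Int × Int) : Int :=
  PySem.List.pyGetD (pvRowZeros board) c.1 0 + PySem.List.pyGetD (pvColZeros board) c.2 0 - 1

-- the selection step 'if g k > best: best, cell = g k, k', as a function of the scored key
def pvSel {α : Type} (g : α → Int) (s : Int × Option α) (k : α) : Int × Option α :=
  if g k > s.1 then (g k, some k) else s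

theorem pvSel_skip {α : Type} (g : α → Int) (s : Int × Option α) (k : α)
    (h : g k ≤ s.1) : pvSel g s k = s := by
  unfold pvSel; rw [if_neg (by omega)]

theorem pvSel_fst_mono {α : Type} (g : α → Int) :
    ∀ (l : List α) (s : Int × Option α), s.1 ≤ (l.foldl (pvSel g) s).1 := by
  intro l
  induction l with
  | nil => intro s; simp
  | cons x l ih =>
    intro s
    refine le_trans ?_ (ih (pvSel g s x))
    by_cases h : g x > s.1
    · simp only [pvSel, if_pos h]; omega
    · rw [pvSel_skip g s x (by omega)]

theorem pvSel_fst_ge_of_mem {α : Type} (g : α → Int) :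
    ∀ (l : List α) (s : Int × Option α) (x : α), x ∈ l → g x ≤ (l.foldl (pvSel g) s).1 := by
  intro l
  induction l with
  | nil => intro s x hx; cases hx
  | cons a l ih =>
    intro s x hx
    rcases List.mem_cons.mp hx with h | h
    · subst h
      refine le_trans ?_ (pvSel_fst_mono g l (pvSel g s x))
      by_cases h : g x > s.1
      · simp only [pvSel, if_pos h]; omega
      · rw [pvSel_skip g s x (by omega)]; omega
    · exact ih _ x h

-- folding the selection over set(cells) (first occurrences) equals folding it over cells:
-- a repeated key can never beat the running maximum it has already set
theorem pvSel_foldl_add {α : Type} [BEq α] [LawfulBEq α] (g : α → Int) :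
    ∀ (l : List α) (acc : List α) (s : Int × Option α),
      (l.foldl PySem.Set.add acc).foldl (pvSel g) s = l.foldl (pvSel g) (acc.foldl (pvSel g) s) := by
  intro l
  induction l with
  | nil => intro acc s; rfl
  | cons x l ih =>
    intro acc s
    have hstep : (PySem.Set.add acc x).foldl (pvSel g) s = pvSel g (acc.foldl (pvSel g) s) x := by
      by_cases hx : x ∈ acc
      · rw [PySem.Set.add_of_mem hx, pvSel_skip g _ x (pvSel_fst_ge_of_mem g acc s x hx)]
      · rw [PySem.Set.add_of_not_mem hx, List.foldl_append]
        rfl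
    simp only [List.foldl_cons, ih, hstep]

theorem pvSel_foldl_ofList {α : Type} [BEq α] [LawfulBEq α] (g : α → Int) (l : List α) (s : Int × Option α) :
    (PySem.Set.ofList l).foldl (pvSel g) s = l.foldl (pvSel g) s := by
  rw [PySem.Set.ofList_eq_foldl, pvSel_foldl_add]
  rfl

-- the dict built by 'degree[cell] = F(cell)' answers F on every inserted key
theorem pvGetD_foldl_insert_fn (F : (Int × Int) → Int) :
    ∀ (l : List (Int × Int)) (d : PySem.Dict (Int × Int) Int) (k : Int × Int),
      (l.foldl (fun d c => d.insert c (F c)) d).getD k 0 =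
        if k ∈ l then F k else d.getD k 0 := by
  intro l
  induction l with
  | nil => intro d k; simp
  | cons c l ih =>
    intro d k
    simp only [List.foldl_cons, ih, PySem.Dict.getD_insert, List.mem_cons]
    by_cases h1 : k ∈ l
    · simp [h1]
    · by_cases h2 : k = c <;> simp [h1, h2]

-- a pyGetD at an in-range negative index, normalised to a Nat position
theorem pvGetD_norm {α : Type} (xs : List α) (i : Int) (d : α)
    (h : PySem.Raise.InRange xs.length i) (hi : i < 0) :
    PySem.List.pyGetD xs i d = xs.getD (i + xs.length).toNat d := by
  obtain ⟨h1, h2⟩ := h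
  have hk : i = -(((-i).toNat : Nat) : Int) := by omega
  conv_lhs => rw [hk]
  rw [PySem.List.pyGetD_neg_natCast xs (-i).toNat d (by omega) (by omega)]
  rw [List.getD_eq_getElem xs d (by omega)]
  congr 1
  omega

-- an in-range Python lookup, as getD at the wrapped non-negative position
theorem pvGetD_wrap {α : Type} (xs : List α) (n : Nat) (y : Int) (d : α)
    (hl : xs.length = n) (hy : PySem.Raise.InRange n y) :
    PySem.List.pyGetD xs y d = xs.getD (if y < 0 then y + n else y).toNat d := by
  obtain ⟨h1, h2⟩ := hy
  by_cases h0 : y < 0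
  · simp only [if_pos h0]
    rw [pvGetD_norm xs y d (by rw [hl]; exact ⟨h1, h2⟩) h0, hl]
  · simp only [if_neg h0]
    rw [PySem.List.pyGetD_eq_getElem xs d (by omega) (by omega),
        List.getD_eq_getElem xs d (by omega)]

-- the column scan of A for column index y equals the precomputed col_zeros entry
theorem pvCol_eq (board : List (List String)) (y : Int)
    (hsq : ∀ row ∈ board, row.length = board.length)
    (hy : PySem.Raise.InRange board.length y) :
    (PySem.List.pyRange 0 (board.length : Int) 1).foldl
      (fun cnt i => if PySem.List.pyGetD (PySem.List.pyGetD board i []) y "" = "0" then cnt + 1 else cnt) 0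
      = PySem.List.pyGetD (pvColZeros board) y 0 := by
  have hn : 0 < board.length := by obtain ⟨h1, h2⟩ := hy; omega
  rw [PySem.List.foldl_pyRange_zero_pyGetD' board []
      (fun cnt row => if PySem.List.pyGetD row y "" = "0" then cnt + 1 else cnt) 0]
  rw [show (fun (cnt : Int) (row : List String) => if PySem.List.pyGetD row y "" = "0" then cnt + 1 else cnt)
        = (fun (cnt : Int) (row : List String) =>
            if (fun r => decide (PySem.List.pyGetD r y "" = "0")) row = true then cnt + 1 else cnt) from by
      funext cnt row; simp]
  rw [PySem.List.foldl_count_if (fun r => decide (PySem.List.pyGetD r y "" = "0")) board]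
  -- all rows have length board.length, so zip(*board) has exactly board.length columns
  have hmin : ((board.map List.length).min?) = some board.length := by
    cases board with
    | nil => simp at hn
    | cons r rs =>
      rw [List.map_cons, List.min?_cons']
      have haux : ∀ (l : List (List String)) (a : Nat), (∀ q ∈ l, q.length = a) →
          List.foldl min a (l.map List.length) = a := by
        intro l
        induction l with
        | nil => intro a _; rfl
        | cons q qs ih =>
          intro a h
          simp only [List.map_cons, List.foldl_cons, h q (List.mem_cons_self),
            min_self]
          exact ih a (fun p hp => h p (List.mem_cons_of_mem q hp))
      rw [hsq r List.mem_cons_self,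
          haux rs (r :: rs).length (fun q hq => hsq q (List.mem_cons_of_mem r hq))]
  have hclen : (pvColZeros board).length = board.length := by
    unfold pvColZeros pvZipStar
    rw [hmin]
    simp
  rw [pvGetD_wrap (pvColZeros board) board.length y 0 hclen hy]
  have hilt : (if y < 0 then y + board.length else y).toNat < board.length := by
    obtain ⟨h1, h2⟩ := hy; split <;> omega
  unfold pvColZeros pvZipStar
  rw [hmin]
  simp only [Option.getD_some, List.map_map]
  rw [PySem.List.getD_map_range _ _ _ _ hilt]
  simp only [Function.comp_apply]
  rw [PySem.List.count_eq, List.count_eq_countP, List.countP_map]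
  have hcp : List.countP (fun r => decide (PySem.List.pyGetD r y "" = "0")) board
      = List.countP ((fun x => x == "0") ∘ fun row => row.getD (if y < 0 then y + board.length else y).toNat "") board := by
    refine List.countP_congr (fun row hrow => ?_)
    simp only [Function.comp_apply]
    rw [pvGetD_wrap row board.length y "" (hsq row hrow) hy, beq_eq_decide]
  omega

-- A's per-cell count equals B's row_zeros[x] + col_zeros[y]
theorem pvCountA_eq (board : List (List String)) (x y : Int)
    (hsq : ∀ row ∈ board, row.length = board.length)
    (hx : PySem.Raise.InRange board.length x) (hy : PySem.Raise.InRange board.length y) :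
    pvCountA board x y =
      PySem.List.pyGetD (pvRowZeros board) x 0 + PySem.List.pyGetD (pvColZeros board) y 0 := by
  unfold pvCountA
  rw [pvCol_eq board y hsq hy]
  have hxm : PySem.List.pyGetD board x [] ∈ board := PySem.List.pyGetD_mem board [] hx
  have hym : PySem.List.pyGetD board y [] ∈ board := PySem.List.pyGetD_mem board [] hy
  have hylen : (PySem.List.pyGetD board y []).length = board.length := hsq _ hym
  have hxlen : (PySem.List.pyGetD board x []).length = board.length := hsq _ hxm
  rw [hylen, ← hxlen]
  rw [PySem.List.foldl_pyRange_zero_pyGetD' (PySem.List.pyGetD board x []) ""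
      (fun cnt s => if s = "0" then cnt + 1 else cnt) _]
  rw [show (fun (cnt : Int) (s : String) => if s = "0" then cnt + 1 else cnt)
        = (fun (cnt : Int) (s : String) => if (fun t => decide (t = "0")) s = true then cnt + 1 else cnt) from by
      funext cnt s; simp]
  rw [PySem.List.foldl_count_if (fun t => decide (t = "0")) (PySem.List.pyGetD board x [])]
  have hrz : PySem.List.pyGetD (pvRowZeros board) x 0 =
      (PySem.List.count (PySem.List.pyGetD board x []) "0" : Int) := by
    unfold pvRowZeros
    have h0 : (0 : Int) = (fun row => (PySem.List.count row "0" : Int)) [] := by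
      simp [PySem.List.count]
    rw [h0, PySem.List.pyGetD_map (fun row => (PySem.List.count row "0" : Int)) board x []]
  rw [hrz]
  have hc : PySem.List.count (PySem.List.pyGetD board x []) "0"
      = List.countP (fun t => decide (t = "0")) (PySem.List.pyGetD board x []) := by
    rw [PySem.List.count_eq, List.count_eq_countP]
    exact List.countP_congr (fun a _ => by rw [beq_eq_decide a "0"])
  omega

-- the whole of A's computation, rewritten to B's selection fold
theorem pvMain (board : List (List String)) (cells : List (Int × Int))
    (hsq : ∀ row ∈ board, row.length = board.length)
    (hcell : ∀ c ∈ cells, PySem.Raise.InRange board.length c.1 ∧ PySem.Raise.InRange board.length c.2) :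
    ((cells.foldl (fun d c => d.insert c (pvCountA board c.1 c.2 - 1)) PySem.Dict.empty).items.foldl
      (fun s p => if p.2 > s.1 then (p.2, some p.1) else s) ((0 : Int), (none : Option (Int × Int)))).2
    = (cells.foldl (pvSel (pvG board)) ((0 : Int), (none : Option (Int × Int)))).2 := by
  have hkeys := PySem.Dict.keys_foldl_insert cells (fun _ c => pvCountA board c.1 c.2 - 1)
    (PySem.Dict.empty (κ := Int × Int) (ν := Int))
  simp only [PySem.Dict.keys_empty, PySem.Set.update_nil_left] at hkeys
  have hnd := PySem.Dict.nodup_keys_foldl_insert cells (fun _ c => pvCountA board c.1 c.2 - 1)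
    (PySem.Dict.empty (κ := Int × Int) (ν := Int)) (by simp [PySem.Dict.keys_empty])
  rw [PySem.Dict.items_eq_map_keys _ hnd 0, hkeys, List.foldl_map]
  rw [PySem.List.foldl_congr_mem (PySem.Set.ofList cells) _ (pvSel (pvG board)) _ ?hcg]
  case hcg =>
    intro acc k hk
    have hkc : k ∈ cells := (PySem.Set.mem_ofList cells k).mp hk
    have hget : (cells.foldl (fun d c => d.insert c (pvCountA board c.1 c.2 - 1)) PySem.Dict.empty).getD k 0
        = pvCountA board k.1 k.2 - 1 := by
      rw [pvGetD_foldl_insert_fn (fun c => pvCountA board c.1 c.2 - 1) cells PySem.Dict.empty k,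
        if_pos hkc]
    simp only [hget, pvSel, pvG, pvCountA_eq board k.1 k.2 hsq (hcell k hkc).1 (hcell k hkc).2]
  rw [pvSel_foldl_ofList]

-- ===== VERDICT (by name: the statement is the Claim_ definition above) =====
theorem degree_heuristic_spec : Claim_equal_degree_heuristic := by
  intro board cells _ hpre
  obtain ⟨hsqor, hcell⟩ := hpre
  simp only [Spec_degree_heuristic, degree_heuristic, degree_heuristic_alt]
  rcases hsqor with hnil | hsq
  · subst hnil; rfl
  · exact pvMain board cells hsq hcell
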